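-- pv_equiv track=rewrite | github.com/hillwithsmallfields/qs | channels/bible.py | book_sequence_chapter
-- ===== SOURCE A (Python) =====
-- def book_sequence_chapter(book_sequence, n):
--     """Return the Nth chapter from a sequence of books."""
--     book = 0
--     begin = 1
--     end = 0
--     for book in book_sequence:
--         end += book[1]
--         if begin <= n and n <= end:
--             return "%s %d" % (book[0], (n - begin) + 1)
--         begin = end + 1
--     return None
-- ===== SOURCE B (Python) =====
-- def book_sequence_chapter(book_sequence, n):
--     """Return the Nth chapter from a sequence of books."""
--     # Pass 1: cumulative start offsets (starts[i] = 1 + sum of chapter counts before book i).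
--     starts = [1]
--     for _, chapters in book_sequence:
--         starts.append(starts[-1] + chapters)
--     # Pass 2: find the half-open range [lo, hi) containing n.
--     for (name, _), lo, hi in zip(book_sequence, starts, starts[1:]):
--         if lo <= n < hi:
--             return "%s %d" % (name, n - lo + 1)
--     return None
-- ===== Notes on version B (the rewrite author's own statement) =====
-- stated objective: alternative
-- what changed: B works in two staged passes: first it materialises the full list of cumulative chapter-start offsets, then it scans the books zipped with their [lo,hi) ranges to find the one containing n, instead of A's fused single loop with running begin/end accumulators.
import Mathlib
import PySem

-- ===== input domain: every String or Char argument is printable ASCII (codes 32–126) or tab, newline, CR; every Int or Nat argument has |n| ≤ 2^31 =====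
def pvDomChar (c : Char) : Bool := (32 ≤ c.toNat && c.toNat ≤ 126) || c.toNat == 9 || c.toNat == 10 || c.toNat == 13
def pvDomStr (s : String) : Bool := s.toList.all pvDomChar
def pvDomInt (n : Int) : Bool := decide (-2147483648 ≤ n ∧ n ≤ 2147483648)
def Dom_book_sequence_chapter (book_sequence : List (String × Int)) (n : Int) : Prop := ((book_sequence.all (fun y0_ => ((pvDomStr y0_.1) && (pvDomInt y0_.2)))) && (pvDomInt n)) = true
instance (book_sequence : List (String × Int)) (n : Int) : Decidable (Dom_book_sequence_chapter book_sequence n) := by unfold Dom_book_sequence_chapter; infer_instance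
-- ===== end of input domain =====

-- B replaces A's fused loop with two staged passes: a precomputed list of cumulative start offsets, then a search over the zipped ranges (alternative decomposition, same cost).

-- ===== PORT A =====
-- A's for-loop over the books with the running `begin`/`end` accumulators.
def bscA_loop (bs : List (String × Int)) (n begin_ end_ : Int) : Option String :=
  match bs with
  | [] => none
  | (name, c) :: rest =>
    let end' := end_ + c
    if begin_ ≤ n ∧ n ≤ end' then some (name ++ " " ++ PySem.Int.toStr ((n - begin_) + 1))
    else bscA_loop rest n (end' + 1) end'

def book_sequence_chapter (book_sequence : List (String × Int)) (n : Int) : Option String :=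
  bscA_loop book_sequence n 1 0

-- ===== PORT B =====
-- Pass 1 of Source B: the list `starts` (head exposed: starts always begins with its seed).
def bscB_starts (bs : List (String × Int)) (s : Int) : List Int :=
  s :: (match bs with
        | [] => []
        | p :: rest => bscB_starts rest (s + p.2))

-- Pass 2 of Source B: scan the zipped (book, lo, hi) rows for the range containing n.
def bscB_find (rows : List ((String × Int) × Int × Int)) (n : Int) : Option String :=
  match rows with
  | [] => none
  | ((name, _), lo, hi) :: rest =>
    if lo ≤ n ∧ n < hi then some (name ++ " " ++ PySem.Int.toStr (n - lo + 1))
    else bscB_find rest n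

def book_sequence_chapter_alt (book_sequence : List (String × Int)) (n : Int) : Option String :=
  let starts := bscB_starts book_sequence 1
  bscB_find (book_sequence.zip (starts.zip starts.tail)) n

-- ===== PRECONDITION & SPEC =====
def Spec_book_sequence_chapter (book_sequence : List (String × Int)) (n : Int) (out : Option String) : Prop := out = book_sequence_chapter_alt book_sequence n
instance (book_sequence : List (String × Int)) (n : Int) (out : Option String) : Decidable (Spec_book_sequence_chapter book_sequence n out) := by unfold Spec_book_sequence_chapter; infer_instance

-- ===== CLAIM =====
def Claim_equal_book_sequence_chapter : Prop := ∀ (book_sequence : List (String × Int)) (n : Int), Dom_book_sequence_chapter book_sequence n → Spec_book_sequence_chapter book_sequence n (book_sequence_chapter book_sequence n)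

-- ===== LEMMAS AND PROOFS =====
theorem bscB_starts_cons (p : String × Int) (rest : List (String × Int)) (s : Int) :
    bscB_starts (p :: rest) s = s :: bscB_starts rest (s + p.2) := by
  rw [bscB_starts.eq_def]

theorem bscB_starts_head (bs : List (String × Int)) (s : Int) : ∃ L, bscB_starts bs s = s :: L := by
  cases bs <;> exact ⟨_, by rw [bscB_starts.eq_def]⟩

-- Invariant: A's loop started at begin = e+1, end = e equals B's search over the ranges seeded at start e+1.
theorem bscA_loop_eq_find (bs : List (String × Int)) : ∀ (n e : Int),
    bscA_loop bs n (e + 1) e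
      = bscB_find (bs.zip ((bscB_starts bs (e + 1)).zip (bscB_starts bs (e + 1)).tail)) n := by
  induction bs with
  | nil => intro n e; rfl
  | cons hd rest ih =>
    intro n e
    obtain ⟨name, c⟩ := hd
    rw [bscB_starts_cons]
    obtain ⟨L, hL⟩ := bscB_starts_head rest (e + 1 + c)
    rw [hL]
    simp only [List.tail_cons, List.zip_cons_cons, bscA_loop, bscB_find]
    have hcond : (e + 1 ≤ n ∧ n ≤ e + c) ↔ (e + 1 ≤ n ∧ n < e + 1 + c) := by omega
    by_cases h : e + 1 ≤ n ∧ n ≤ e + c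
    · rw [if_pos h, if_pos (hcond.mp h)]
    · rw [if_neg h, if_neg (fun hc => h (hcond.mpr hc))]
      have hT : L = (bscB_starts rest (e + 1 + c)).tail := by rw [hL]; rfl
      rw [hT] at hL
      rw [hT, ← hL]
      have h3 : e + 1 + c = (e + c) + 1 := by ring
      rw [h3, ih n (e + c)]

-- ===== VERDICT =====
theorem book_sequence_chapter_spec : Claim_equal_book_sequence_chapter := by
  intro bs n _
  unfold Spec_book_sequence_chapter book_sequence_chapter book_sequence_chapter_alt
  have := bscA_loop_eq_find bs n 0
  simpa using this
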